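-- pv_equiv track=rewrite | github.com/raik096/edge-anomaly-detection-sat | satellite/benchmark/chron_benchmark.py | binary_series_to_intervals
-- ===== SOURCE A (Python) =====
-- def binary_series_to_intervals(series):
--     intervals = []
--     start = None
--     for i, val in enumerate(series):
--         if val == 1 and start is None:
--             start = i
--         elif val == 0 and start is not None:
--             intervals.append((start, i - 1))
--             start = None
--     if start is not None:
--         intervals.append((start, len(series) - 1))
--     return intervals
-- ===== SOURCE B (Python) =====
-- def binary_series_to_intervals(series):
--     # Segment view: the 0 positions split the series into zero-free runs;
--     # each run contributes (index of its first 1, run end) if it contains a 1.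
--     intervals = []
--     a = 0
--     zeros = [i for i, v in enumerate(series) if v == 0]
--     for z in zeros + [len(series)]:
--         j = next((k for k in range(a, z) if series[k] == 1), None)
--         if j is not None:
--             intervals.append((j, z - 1))
--         a = z + 1
--     return intervals
-- ===== Notes on version B (the rewrite author's own statement) =====
-- stated objective: alternative
-- what changed: Replaces A's single-pass start/None state machine with a segment decomposition: B collects the 0 positions, splits the series into zero-free segments, and emits (first index of a 1 in the segment, segment end) for each segment that contains a 1.
import Mathlib
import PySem

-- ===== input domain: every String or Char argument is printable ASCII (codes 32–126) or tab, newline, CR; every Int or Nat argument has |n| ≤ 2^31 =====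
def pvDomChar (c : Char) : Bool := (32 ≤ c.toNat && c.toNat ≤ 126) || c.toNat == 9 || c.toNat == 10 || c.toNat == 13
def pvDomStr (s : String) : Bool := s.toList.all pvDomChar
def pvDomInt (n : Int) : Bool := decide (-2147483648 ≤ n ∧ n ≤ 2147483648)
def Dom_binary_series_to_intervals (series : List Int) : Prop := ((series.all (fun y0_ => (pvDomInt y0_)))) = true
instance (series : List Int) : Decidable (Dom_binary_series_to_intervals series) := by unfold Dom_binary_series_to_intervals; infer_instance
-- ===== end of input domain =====

-- B replaces A's start/None state machine by a split-at-zeros decomposition (alternative decomposition, same cost).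


-- ===== PORT A =====
-- A's for-loop over enumerate(series) as structural recursion over the same state
-- (running index i, accumulated intervals, optional open start).
def pvALoop : List Int → Nat → List (Int × Int) → Option Nat → List (Int × Int) × Option Nat
  | [], _, intervals, start => (intervals, start)
  | v :: rest, i, intervals, start =>
    if v = 1 ∧ start = none then pvALoop rest (i + 1) intervals (some i)
    else if v = 0 ∧ start ≠ none then
      pvALoop rest (i + 1) (intervals ++ [((start.getD 0 : Int), (i : Int) - 1)]) none
    else pvALoop rest (i + 1) intervals start

def binary_series_to_intervals (series : List Int) : List (Int × Int) :=
  let st := pvALoop series 0 [] none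
  match st.2 with
  | some s => st.1 ++ [((s : Int), (series.length : Int) - 1)]
  | none => st.1

-- ===== PORT B =====
-- zeros = [i for i, v in enumerate(series) if v == 0]
def pvZeros (series : List Int) : List Int :=
  ((PySem.List.enumerate series 0).filter (fun p => p.2 == 0)).map (fun p => p.1)

-- next((k for k in range(a, z) if series[k] == 1), None); every probed k is a
-- valid nonnegative index, where pyGet? series k = some series[k] exactly.
def pvFirstOne (series : List Int) (a z : Int) : Option Int :=
  (PySem.List.pyRange a z 1).find? (fun k => PySem.List.pyGet? series k == some 1)

-- the for-loop over zeros + [len(series)] with state (a, intervals)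
def pvBLoop (series : List Int) : List Int → Int → List (Int × Int) → List (Int × Int)
  | [], _, intervals => intervals
  | z :: rest, a, intervals =>
    let intervals' :=
      match pvFirstOne series a z with
      | some j => intervals ++ [(j, z - 1)]
      | none => intervals
    pvBLoop series rest (z + 1) intervals'

def binary_series_to_intervals_alt (series : List Int) : List (Int × Int) :=
  pvBLoop series (pvZeros series ++ [(series.length : Int)]) 0 []

-- ===== PRECONDITION & SPEC =====
def Spec_binary_series_to_intervals (series : List Int) (out : List (Int × Int)) : Prop := out = binary_series_to_intervals_alt series
instance (series : List Int) (out : List (Int × Int)) : Decidable (Spec_binary_series_to_intervals series out) := by unfold Spec_binary_series_to_intervals; infer_instance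

-- ===== CLAIM (what is proved, stated in full; the proofs are below) =====
def Claim_equal_binary_series_to_intervals : Prop := ∀ (series : List Int), Dom_binary_series_to_intervals series → Spec_binary_series_to_intervals series (binary_series_to_intervals series)

-- ===== LEMMAS AND PROOFS =====

-- Common specification: fSpec = closed state at index i; gSpec = open at s, index i.
mutual
def fSpec : List Int → Nat → List (Int × Int)
  | [], _ => []
  | v :: rest, i => if v = 1 then gSpec rest i (i + 1) else fSpec rest (i + 1)
def gSpec : List Int → Nat → Nat → List (Int × Int)
  | [], s, i => [((s : Int), (i : Int) - 1)]
  | v :: rest, s, i =>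
    if v = 0 then ((s : Int), (i : Int) - 1) :: fSpec rest (i + 1) else gSpec rest s (i + 1)
end

def pvFinish (p : List (Int × Int) × Option Nat) (n : Nat) : List (Int × Int) :=
  match p.2 with
  | some s => p.1 ++ [((s : Int), (n : Int) - 1)]
  | none => p.1

theorem aLoop_spec : ∀ (l : List Int) (i : Nat) (acc : List (Int × Int)),
    pvFinish (pvALoop l i acc none) (i + l.length) = acc ++ fSpec l i
    ∧ ∀ s : Nat, pvFinish (pvALoop l i acc (some s)) (i + l.length) = acc ++ gSpec l s i := by
  intro l
  induction l with
  | nil =>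
    intro i acc
    refine ⟨by simp [pvALoop, pvFinish, fSpec], fun s => by simp [pvALoop, pvFinish, gSpec]⟩
  | cons v rest ih =>
    intro i acc
    have hlen : i + (v :: rest).length = (i + 1) + rest.length := by simp; omega
    constructor
    · by_cases h1 : v = 1
      · rw [hlen]
        simp only [pvALoop, fSpec, if_pos h1]
        simpa [h1] using (ih (i + 1) acc).2 i
      · rw [hlen]
        simp only [pvALoop, fSpec, if_neg h1]
        simpa [h1] using (ih (i + 1) acc).1
    · intro s
      by_cases h0 : v = 0
      · rw [hlen]
        simp only [pvALoop, gSpec, if_pos h0]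
        have := (ih (i + 1) (acc ++ [((s : Int), (i : Int) - 1)])).1
        simp only [List.append_assoc, List.cons_append, List.nil_append] at this
        simpa [h0] using this
      · rw [hlen]
        simp only [pvALoop, gSpec, if_neg h0]
        simpa [h0] using (ih (i + 1) acc).2 s

-- zero positions of the suffix starting at offset a, as global indices
def zerosFrom : List Int → Nat → List Int
  | [], _ => []
  | v :: rest, a => if v = 0 then (a : Int) :: zerosFrom rest (a + 1) else zerosFrom rest (a + 1)

theorem pvZeros_eq_zerosFrom : ∀ (l : List Int) (a : Nat),
    ((PySem.List.enumerate l (a : Int)).filter (fun p => p.2 == 0)).map (fun p => p.1)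
      = zerosFrom l a := by
  intro l
  induction l with
  | nil => intro a; simp [PySem.List.enumerate_nil, zerosFrom]
  | cons v rest ih =>
    intro a
    rw [PySem.List.enumerate_cons]
    have hc : ((a : Int) + 1) = ((a + 1 : Nat) : Int) := by push_cast; ring
    rw [List.filter_cons]
    by_cases h0 : v = 0
    · rw [if_pos (by simp [h0])]
      simp only [List.map_cons]
      rw [hc, ih (a + 1)]
      simp [zerosFrom, h0]
    · rw [if_neg (by simp [h0])]
      rw [hc, ih (a + 1)]
      simp [zerosFrom, h0]

theorem drop_cons_get {series : List Int} {a : Nat} {v : Int} {t : List Int}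
    (h : series.drop a = v :: t) : series[a]? = some v := by
  have h0 := congrArg (fun l : List Int => l[0]?) h
  simpa [List.getElem?_drop] using h0

theorem firstOne_eq : ∀ (seg : List Int) (series tail : List Int) (a : Nat),
    series.drop a = seg ++ tail →
    pvFirstOne series (a : Int) ((a : Int) + seg.length) =
      (seg.findIdx? (fun v => v == 1)).map (fun j : Nat => ((a : Int) + (j : Int))) := by
  intro seg
  induction seg with
  | nil =>
    intro series tail a h
    unfold pvFirstOne
    rw [show ((a : Int) + (([] : List Int).length : Int)) = (a : Int) from by simp,
      PySem.List.pyRange_one_eq_nil le_rfl]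
    simp
  | cons v seg' ih =>
    intro series tail a h
    have hlt : (a : Int) < (a : Int) + (v :: seg').length := by simp
    have hh : series.drop a = v :: (seg' ++ tail) := h
    have hget : series[a]? = some v := drop_cons_get (t := seg' ++ tail) hh
    unfold pvFirstOne
    rw [PySem.List.pyRange_one_cons hlt, List.find?_cons]
    by_cases h1 : v = 1
    · have hp : (PySem.List.pyGet? series ((a : Nat) : Int) == some 1) = true := by
        simp [PySem.List.pyGet?_natCast, hget, h1]
      rw [hp, List.findIdx?_cons]
      simp [h1]
    · have hp : (PySem.List.pyGet? series ((a : Nat) : Int) == some 1) = false := by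
        simp [PySem.List.pyGet?_natCast, hget, h1]
      rw [hp]
      have hdrop : series.drop (a + 1) = seg' ++ tail := by
        have hd : (series.drop a).drop 1 = series.drop (a + 1) := List.drop_drop
        rw [← hd, h]
        simp
      have hcast1 : ((a : Int) + 1) = ((a + 1 : Nat) : Int) := by push_cast; ring
      have hcast2 : ((a : Int) + ((v :: seg').length : Int)) = (((a + 1 : Nat)) : Int) + (seg'.length : Int) := by
        simp; push_cast; ring
      simp only [hcast2, hcast1]
      have hih := ih series tail (a + 1) hdrop
      unfold pvFirstOne at hih
      try simp only [List.length_cons] at hih ⊢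
      rw [hih, List.findIdx?_cons]
      simp only [show (v == 1) = false from by simp [h1], Bool.false_eq_true, if_false]
      cases hfi : seg'.findIdx? (fun v => v == 1) with
      | none => simp [hfi]
      | some j =>
        simp only [hfi, Option.map_some]
        simp
        omega

theorem gSpec_no_zero : ∀ (l : List Int) (s i : Nat), (0 : Int) ∉ l →
    gSpec l s i = [((s : Int), ((i + l.length : Nat) : Int) - 1)] := by
  intro l
  induction l with
  | nil => intro s i _; simp [gSpec]
  | cons v rest ih =>
    intro s i h
    have hv : v ≠ 0 := fun hv => h (by simp [hv])
    have hr : (0 : Int) ∉ rest := fun hr => h (by simp [hr])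
    simp only [gSpec, if_neg hv, ih s (i + 1) hr, List.length_cons]
    rw [show i + 1 + rest.length = i + (rest.length + 1) from by omega]

theorem fSpec_no_zero : ∀ (l : List Int) (a : Nat), (0 : Int) ∉ l →
    fSpec l a = (match l.findIdx? (fun v => v == 1) with
      | some j => [(((a + j : Nat) : Int), ((a + l.length : Nat) : Int) - 1)]
      | none => []) := by
  intro l
  induction l with
  | nil => intro a _; simp [fSpec]
  | cons v rest ih =>
    intro a h
    have hr : (0 : Int) ∉ rest := fun hr => h (by simp [hr])
    by_cases h1 : v = 1
    · simp only [fSpec, if_pos h1, gSpec_no_zero rest a (a + 1) hr, List.findIdx?_cons]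
      simp [h1]
      omega
    · simp only [fSpec, if_neg h1, ih (a + 1) hr, List.findIdx?_cons]
      simp only [show (v == 1) = false from by simp [h1], Bool.false_eq_true, if_false]
      cases hfi : rest.findIdx? (fun v => v == 1) <;> simp [hfi] <;> omega

theorem gSpec_split : ∀ (seg' rest : List Int) (s i : Nat), (0 : Int) ∉ seg' →
    gSpec (seg' ++ 0 :: rest) s i
      = ((s : Int), ((i + seg'.length : Nat) : Int) - 1) :: fSpec rest (i + seg'.length + 1) := by
  intro seg'
  induction seg' with
  | nil => intro rest s i _; simp [gSpec]
  | cons v sg ih =>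
    intro rest s i h
    have hv : v ≠ 0 := fun hv => h (by simp [hv])
    have hs : (0 : Int) ∉ sg := fun hs => h (by simp [hs])
    simp only [List.cons_append, gSpec, if_neg hv, ih rest s (i + 1) hs, List.length_cons]
    rw [show i + 1 + sg.length = i + (sg.length + 1) from by omega]

theorem fSpec_split : ∀ (seg rest : List Int) (a : Nat), (0 : Int) ∉ seg →
    fSpec (seg ++ 0 :: rest) a = (match seg.findIdx? (fun v => v == 1) with
      | some j => [(((a + j : Nat) : Int), ((a + seg.length : Nat) : Int) - 1)]
      | none => []) ++ fSpec rest (a + seg.length + 1) := by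
  intro seg
  induction seg with
  | nil => intro rest a _; simp [fSpec]
  | cons v sg ih =>
    intro rest a h
    have hv : v ≠ 0 := fun hv => h (by simp [hv])
    have hs : (0 : Int) ∉ sg := fun hs => h (by simp [hs])
    by_cases h1 : v = 1
    · simp only [List.cons_append, fSpec, if_pos h1, gSpec_split sg rest a (a + 1) hs,
        List.findIdx?_cons]
      simp [h1]
      constructor
      · omega
      · rw [show a + 1 + sg.length + 1 = a + (sg.length + 1) + 1 from by omega]
    · simp only [List.cons_append, fSpec, if_neg h1, ih rest (a + 1) hs, List.findIdx?_cons]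
      simp only [show (v == 1) = false from by simp [h1], Bool.false_eq_true, if_false]
      cases hfi : sg.findIdx? (fun v => v == 1) <;> simp [hfi] <;>
        rw [show a + 1 + sg.length + 1 = a + (sg.length + 1) + 1 from by omega] <;> simp <;> omega

theorem zerosFrom_no_zero : ∀ (l : List Int) (a : Nat), (0 : Int) ∉ l → zerosFrom l a = [] := by
  intro l
  induction l with
  | nil => intro a _; rfl
  | cons v rest ih =>
    intro a h
    have hv : v ≠ 0 := fun hv => h (by simp [hv])
    simp only [zerosFrom, if_neg hv]
    exact ih (a + 1) (fun hr => h (by simp [hr]))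

theorem zerosFrom_split : ∀ (seg rest : List Int) (a : Nat), (0 : Int) ∉ seg →
    zerosFrom (seg ++ 0 :: rest) a
      = ((a + seg.length : Nat) : Int) :: zerosFrom rest (a + seg.length + 1) := by
  intro seg
  induction seg with
  | nil => intro rest a _; simp [zerosFrom]
  | cons v sg ih =>
    intro rest a h
    have hv : v ≠ 0 := fun hv => h (by simp [hv])
    simp only [List.cons_append, zerosFrom, if_neg hv,
      ih rest (a + 1) (fun hs => h (by simp [hs])), List.length_cons]
    rw [show a + 1 + sg.length = a + (sg.length + 1) from by omega]

theorem split_at_zero : ∀ (l : List Int), (0 : Int) ∈ l →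
    ∃ seg rest, l = seg ++ 0 :: rest ∧ (0 : Int) ∉ seg := by
  intro l
  induction l with
  | nil => intro h; simp at h
  | cons v rest ih =>
    intro h
    by_cases hv : v = 0
    · exact ⟨[], rest, by simp [hv], by simp⟩
    · have hr : (0 : Int) ∈ rest := by
        rcases List.mem_cons.mp h with h' | h'
        · exact absurd h' (fun h2 => hv h2.symm)
        · exact h'
      obtain ⟨seg, rest', heq, hnz⟩ := ih hr
      exact ⟨v :: seg, rest', by simp [heq], by
        simp only [List.mem_cons]
        rintro (h' | h')
        · exact hv h'.symm
        · exact hnz h'⟩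

theorem bLoop_spec : ∀ (n : Nat) (l : List Int) (series : List Int) (a : Nat)
    (acc : List (Int × Int)), l.length = n → series.drop a = l →
    pvBLoop series (zerosFrom l a ++ [((a + l.length : Nat) : Int)]) (a : Int) acc
      = acc ++ fSpec l a := by
  intro n
  induction n using Nat.strong_induction_on with
  | _ n ih =>
    intro l series a acc hn hdrop
    by_cases h0 : (0 : Int) ∈ l
    · obtain ⟨seg, rest, heq, hnz⟩ := split_at_zero l h0
      subst heq
      rw [zerosFrom_split seg rest a hnz]
      simp only [List.cons_append, pvBLoop]
      have hfo : pvFirstOne series (a : Int) ((a + seg.length : Nat) : Int)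
          = (seg.findIdx? (fun v => v == 1)).map (fun j : Nat => ((a : Int) + (j : Int))) := by
        rw [show ((a + seg.length : Nat) : Int) = (a : Int) + ((seg.length : Nat) : Int) from by
          push_cast; ring]
        exact firstOne_eq seg series (0 :: rest) a hdrop
      have hdrop' : series.drop (a + seg.length + 1) = rest := by
        have h2 : series.drop (a + (seg.length + 1)) = (series.drop a).drop (seg.length + 1) := by
          rw [List.drop_drop]
        rw [show a + seg.length + 1 = a + (seg.length + 1) from by omega, h2, hdrop]
        simp
      have hlen : rest.length < n := by subst hn; simp; omega
      have hrec := ih rest.length hlen rest series (a + seg.length + 1) ?acc rfl hdrop'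
      case acc => exact (match seg.findIdx? (fun v => v == 1) with
        | some j => acc ++ [(((a : Int) + j), ((a + seg.length : Nat) : Int) - 1)]
        | none => acc)
      rw [fSpec_split seg rest a hnz]
      have hend : ((a + (seg ++ 0 :: rest).length : Nat) : Int)
          = (((a + seg.length + 1) + rest.length : Nat) : Int) := by
        congr 1; simp; omega
      have hz1 : ((a + seg.length : Nat) : Int) + 1 = ((a + seg.length + 1 : Nat) : Int) := by
        push_cast; ring
      rw [hend, hfo, hz1]
      cases hfi : seg.findIdx? (fun v => v == 1) with
      | none =>
        simp only [hfi, Option.map_none] at hrec ⊢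
        rw [hrec]
        simp
      | some j =>
        simp only [hfi, Option.map_some] at hrec ⊢
        rw [hrec]
        simp
    · rw [zerosFrom_no_zero l a h0]
      simp only [List.nil_append, pvBLoop]
      have hfo : pvFirstOne series (a : Int) ((a + l.length : Nat) : Int)
          = (l.findIdx? (fun v => v == 1)).map (fun j : Nat => ((a : Int) + (j : Int))) := by
        rw [show ((a + l.length : Nat) : Int) = (a : Int) + ((l.length : Nat) : Int) from by
          push_cast; ring]
        exact firstOne_eq l series [] a (by simpa using hdrop)
      rw [hfo, fSpec_no_zero l a h0]
      cases hfi : l.findIdx? (fun v => v == 1) <;> simp [hfi]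


-- ===== VERDICT (by name: the statement is the Claim_ definition above) =====
theorem binary_series_to_intervals_spec : Claim_equal_binary_series_to_intervals := by
  intro series _
  unfold Spec_binary_series_to_intervals binary_series_to_intervals binary_series_to_intervals_alt pvZeros
  have hA := (aLoop_spec series 0 []).1
  have hB := bLoop_spec series.length series series 0 [] rfl rfl
  have hz := pvZeros_eq_zerosFrom series 0
  simp only [pvFinish] at hA
  simp only [Nat.zero_add, Nat.cast_zero, List.nil_append] at hA hB hz
  rw [hz, hB]
  exact hA
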